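-- pv_equiv track=rewrite | github.com/SaharaSurfer/spbu-python-course | project/generators/rgba_gen.py | get_nth_rgba_vec
-- ===== SOURCE A (Python) =====
-- from typing import Generator
-- from itertools import product
--
-- def get_rgba_gen() -> Generator[tuple[int, int, int, int], None, None]:
--     """
--     Generates all possible RGBA color combinations.
--
--     This generator produces tuples representing all possible combinations of RGB values
--     (with each component ranging from 0 to 255) and an alpha value (ranging from 0 to 100,
--     but only even values are considered).
--
--     The output is in the format (R, G, B, A), where:
--     - R: Red component (0-255)
--     - G: Green component (0-255)
--     - B: Blue component (0-255)
--     - A: Alpha transparency component (0, 2, 4, ..., 100)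
--
--     Yields:
--     tuple[int, int, int, int]
--         A tuple representing an RGBA color (R, G, B, A).
--
--     Example:
--     >>> gen = get_rgba_gen()
--     >>> next(gen)
--     (0, 0, 0, 0)
--     >>> next(gen)
--     (0, 0, 0, 2)
--     >>> next(gen)
--     (0, 0, 0, 4)
--     """
--
--     return (
--         (r, g, b, a)
--         for r, g, b in product(range(256), repeat=3)
--         for a in range(0, 101)
--         if a % 2 == 0
--     )
--
-- def get_nth_rgba_vec(n: int) -> tuple[int, int, int, int]:
--     """
--     Retrieves the nth RGBA vector from the RGBA generator.
--
--     This function uses the `get_rgba_gen()` generator to retrieve the RGBA color tuple at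
--     the specified index `n`. The index is 0-based, meaning the first element corresponds
--     to `n=0`. If `n` is negative, it raises an `IndexError`.
--
--     Args:
--         n : The 0-based index of the RGBA tuple to retrieve.
--
--     Returns:
--     tuple[int, int, int, int]:
--         The RGBA tuple at the specified index `n`.
--
--     Raises:
--     IndexError:
--         If `n` is negative, or if the index exceeds the number of elements that can be generated.
--
--     Example:
--     >>> get_nth_rgba_vec(0)
--     (0, 0, 0, 0)
--     >>> get_nth_rgba_vec(1)
--     (0, 0, 0, 2)
--     >>> get_nth_rgba_vec(5)
--     (0, 0, 0, 10)
--     """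
--
--     if n < 0:
--         raise IndexError("`n` must be non-negative")
--
--     gen = get_rgba_gen()
--
--     for i, val in enumerate(gen):
--         if i == n:
--             return val
--
--     raise IndexError(f"Generator does not have {n} elements.")
-- ===== SOURCE B (Python) =====
-- def get_nth_rgba_vec(n: int) -> tuple[int, int, int, int]:
--     if n < 0:
--         raise IndexError("`n` must be non-negative")
--     if n >= 256 * 256 * 256 * 51:
--         raise IndexError(f"Generator does not have {n} elements.")
--     q, a_half = divmod(n, 51)
--     q, b = divmod(q, 256)
--     r, g = divmod(q, 256)
--     return (r, g, b, 2 * a_half)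
-- ===== Notes on version B (the rewrite author's own statement) =====
-- stated objective: faster
-- what changed: B replaces A's linear scan through the RGBA generator with a closed-form mixed-radix divmod decomposition of the index (bases 256,256,256,51).
import Mathlib
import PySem

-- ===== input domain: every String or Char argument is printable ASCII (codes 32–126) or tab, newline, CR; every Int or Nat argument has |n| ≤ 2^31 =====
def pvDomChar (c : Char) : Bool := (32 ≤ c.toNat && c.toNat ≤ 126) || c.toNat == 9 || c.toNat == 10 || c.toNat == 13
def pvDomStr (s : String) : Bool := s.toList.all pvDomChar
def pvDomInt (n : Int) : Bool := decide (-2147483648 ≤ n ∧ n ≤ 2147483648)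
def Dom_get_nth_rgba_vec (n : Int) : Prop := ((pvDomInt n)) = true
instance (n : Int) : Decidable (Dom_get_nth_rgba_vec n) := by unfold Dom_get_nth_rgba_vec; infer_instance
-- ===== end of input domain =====

-- B replaces A's linear scan through the RGBA generator by a closed-form divmod decomposition of the index.

-- ===== PORT A =====
-- A enumerates the generator lazily; the port walks the same nested loops
-- (r, g, b over range(256), a over range(0,101) filtered to even) carrying the
-- running enumerate counter i, stopping as soon as i = n.
def aLoopA (r g b : Int) (as_ : List Int) (i n : Int) : (List Int) ⊕ Int :=
  match as_ with
  | [] => .inr i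
  | a :: rest =>
    if a % 2 = 0 then
      if i = n then .inl [r, g, b, a]
      else aLoopA r g b rest (i + 1) n
    else aLoopA r g b rest i n

def bLoopA (r g : Int) (bs : List Int) (i n : Int) : (List Int) ⊕ Int :=
  match bs with
  | [] => .inr i
  | b :: rest =>
    match aLoopA r g b (PySem.List.pyRange 0 101 1) i n with
    | .inl v => .inl v
    | .inr i' => bLoopA r g rest i' n

def gLoopA (r : Int) (gs : List Int) (i n : Int) : (List Int) ⊕ Int :=
  match gs with
  | [] => .inr i
  | g :: rest =>
    match bLoopA r g (PySem.List.pyRange 0 256 1) i n with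
    | .inl v => .inl v
    | .inr i' => gLoopA r rest i' n

def rLoopA (rs : List Int) (i n : Int) : (List Int) ⊕ Int :=
  match rs with
  | [] => .inr i
  | r :: rest =>
    match gLoopA r (PySem.List.pyRange 0 256 1) i n with
    | .inl v => .inl v
    | .inr i' => rLoopA rest i' n

def get_nth_rgba_vec (n : Int) : List Int :=
  if n < 0 then []  -- Python raises IndexError here (outside Pre_)
  else
    match rLoopA (PySem.List.pyRange 0 256 1) 0 n with
    | .inl v => v
    | .inr _ => []  -- generator exhausted: Python raises IndexError (outside Pre_)

-- ===== PORT B =====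
def get_nth_rgba_vec_alt (n : Int) : List Int :=
  if n < 0 then []  -- raises in Python B (outside Pre_)
  else if 256 * 256 * 256 * 51 ≤ n then []  -- raises in Python B (outside Pre_)
  else
    let q1 := PySem.Int.floordiv n 51
    let ah := PySem.Int.mod n 51
    let q2 := PySem.Int.floordiv q1 256
    let b  := PySem.Int.mod q1 256
    let r  := PySem.Int.floordiv q2 256
    let g  := PySem.Int.mod q2 256
    [r, g, b, 2 * ah]

-- ===== PRECONDITION & SPEC =====
-- Pre_ excludes exactly the inputs on which Python A raises IndexError:
-- n < 0, and n beyond the 256*256*256*51 tuples the generator yields.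
def Pre_get_nth_rgba_vec (n : Int) : Prop := 0 ≤ n ∧ n < 256 * 256 * 256 * 51
instance (n : Int) : Decidable (Pre_get_nth_rgba_vec n) := by unfold Pre_get_nth_rgba_vec; infer_instance
def pvWitness_get_nth_rgba_vec : Int := 12345

def Spec_get_nth_rgba_vec (n : Int) (out : List Int) : Prop := out = get_nth_rgba_vec_alt n
instance (n : Int) (out : List Int) : Decidable (Spec_get_nth_rgba_vec n out) := by unfold Spec_get_nth_rgba_vec; infer_instance

-- ===== CLAIM (what is proved, stated in full; the proofs are below) =====
def Claim_equal_get_nth_rgba_vec : Prop := ∀ (n : Int), Dom_get_nth_rgba_vec n → Pre_get_nth_rgba_vec n → Spec_get_nth_rgba_vec n (get_nth_rgba_vec n)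

-- ===== LEMMAS AND PROOFS =====

-- proof-only helper lists: rangeI j m = [j, j+1, …, j+m-1]; evList j m = [j, j+1, …, j+2m]
def rangeI (j : Int) : Nat → List Int
  | 0 => []
  | m + 1 => j :: rangeI (j + 1) m

def evList (j : Int) : Nat → List Int
  | 0 => [j]
  | m + 1 => j :: (j + 1) :: evList (j + 2) m

lemma rangeI_eq (m : Nat) : ∀ j : Int, PySem.List.pyRange j (j + (m : Int)) 1 = rangeI j m := by
  induction m with
  | zero => intro j; simp [rangeI, PySem.List.pyRange_one_eq_nil]
  | succ m ih =>
    intro j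
    rw [PySem.List.pyRange_one_cons (by push_cast; omega)]
    have h : j + ((m : Int) + 1) = (j + 1) + (m : Int) := by ring
    push_cast
    rw [h, ih (j + 1)]
    rfl

lemma evList_eq (m : Nat) : ∀ j : Int, PySem.List.pyRange j (j + 2 * (m : Int) + 1) 1 = evList j m := by
  induction m with
  | zero =>
    intro j
    rw [show j + 2 * ((0 : Nat) : Int) + 1 = j + 1 by push_cast; ring,
        PySem.List.pyRange_one_singleton]
    rfl
  | succ m ih =>
    intro j
    rw [PySem.List.pyRange_one_cons (by push_cast; omega),
        PySem.List.pyRange_one_cons (by push_cast; omega)]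
    have e2 : j + 1 + 1 = j + 2 := by ring
    rw [e2, show j + 2 * ((m : Nat) + 1 : Nat) + 1 = (j + 2) + 2 * (m : Int) + 1 by push_cast; ring,
        ih (j + 2)]
    rfl

lemma pyRange101 : PySem.List.pyRange 0 101 1 = evList 0 50 := by
  have h := evList_eq 50 0
  norm_num at h
  exact h

lemma pyRange256 : PySem.List.pyRange 0 256 1 = rangeI 0 256 := by
  have h := rangeI_eq 256 0
  norm_num at h
  exact h

lemma sumEq : ∀ (x1 x2 x3 x4 y1 y2 y3 y4 : Int), x1 = y1 → x2 = y2 → x3 = y3 → x4 = y4 →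
    (Sum.inl [x1, x2, x3, x4] : (List Int) ⊕ Int) = Sum.inl [y1, y2, y3, y4] := by
  intro x1 x2 x3 x4 y1 y2 y3 y4 h1 h2 h3 h4
  rw [h1, h2, h3, h4]

lemma aLoop_spec (m : Nat) : ∀ (j r g b i n : Int), j % 2 = 0 →
    aLoopA r g b (evList j m) i n =
      if i ≤ n ∧ n < i + ((m : Int) + 1) then .inl [r, g, b, j + 2 * (n - i)]
      else .inr (i + ((m : Int) + 1)) := by
  induction m with
  | zero =>
    intro j r g b i n hj
    show (if j % 2 = 0 then (if i = n then Sum.inl [r, g, b, j] else aLoopA r g b [] (i + 1) n)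
          else aLoopA r g b [] i n) = _
    rw [if_pos hj]
    by_cases h : i = n
    · rw [if_pos h, if_pos (by push_cast; omega)]
      exact sumEq _ _ _ _ _ _ _ _ rfl rfl rfl (by omega)
    · rw [if_neg h]
      show Sum.inr (i + 1) = _
      rw [if_neg (by push_cast; omega)]
      push_cast
      norm_num
  | succ m ih =>
    intro j r g b i n hj
    show (if j % 2 = 0 then (if i = n then Sum.inl [r, g, b, j]
            else aLoopA r g b ((j + 1) :: evList (j + 2) m) (i + 1) n)
          else aLoopA r g b ((j + 1) :: evList (j + 2) m) i n) = _
    rw [if_pos hj]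
    by_cases h : i = n
    · rw [if_pos h, if_pos (by push_cast; omega)]
      exact sumEq _ _ _ _ _ _ _ _ rfl rfl rfl (by omega)
    · rw [if_neg h]
      show (if (j + 1) % 2 = 0 then (if i + 1 = n then Sum.inl [r, g, b, j + 1]
              else aLoopA r g b (evList (j + 2) m) (i + 1 + 1) n)
            else aLoopA r g b (evList (j + 2) m) (i + 1) n) = _
      rw [if_neg (by omega), ih (j + 2) r g b (i + 1) n (by omega)]
      by_cases h2 : i + 1 ≤ n ∧ n < i + 1 + ((m : Int) + 1)
      · rw [if_pos h2, if_pos (by push_cast at h2 ⊢; omega)]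
        exact sumEq _ _ _ _ _ _ _ _ rfl rfl rfl (by omega)
      · rw [if_neg h2, if_neg (by push_cast at h2 ⊢; omega)]
        push_cast
        norm_num
        ring

lemma bLoop_spec (m : Nat) : ∀ (j r g i n : Int),
    bLoopA r g (rangeI j m) i n =
      if i ≤ n ∧ n < i + 51 * (m : Int) then
        .inl [r, g, j + (n - i)/ 51, 2 * ((n - i)% 51)]
      else .inr (i + 51 * (m : Int)) := by
  induction m with
  | zero =>
    intro j r g i n
    show Sum.inr i = _
    rw [if_neg (by push_cast; omega)]
    push_cast
    norm_num
  | succ m ih =>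
    intro j r g i n
    show (match aLoopA r g j (PySem.List.pyRange 0 101 1) i n with
          | .inl v => Sum.inl v
          | .inr i' => bLoopA r g (rangeI (j + 1) m) i' n) = _
    rw [pyRange101, aLoop_spec 50 0 r g j i n (by omega)]
    by_cases h : i ≤ n ∧ n < i + (((50 : Nat) : Int) + 1)
    · rw [if_pos h]
      show Sum.inl [r, g, j, 0 + 2 * (n - i)] = _
      rw [if_pos (by push_cast at h ⊢; omega)]
      push_cast at h
      exact sumEq _ _ _ _ _ _ _ _ rfl rfl (by omega) (by omega)
    · rw [if_neg h]
      show bLoopA r g (rangeI (j + 1) m) (i + (((50 : Nat) : Int) + 1)) n = _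
      rw [ih (j + 1) r g (i + (((50 : Nat) : Int) + 1)) n]
      by_cases h2 : i + (((50 : Nat) : Int) + 1) ≤ n ∧ n < i + (((50 : Nat) : Int) + 1) + 51 * (m : Int)
      · rw [if_pos h2, if_pos (by push_cast at h h2 ⊢; omega)]
        push_cast at h h2
        exact sumEq _ _ _ _ _ _ _ _ rfl rfl (by omega) (by omega)
      · rw [if_neg h2, if_neg (by push_cast at h h2 ⊢; omega)]
        push_cast
        norm_num
        ring

lemma gLoop_spec (m : Nat) : ∀ (j r i n : Int),
    gLoopA r (rangeI j m) i n =
      if i ≤ n ∧ n < i + 13056 * (m : Int) then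
        .inl [r, j + (n - i)/ 13056, ((n - i)% 13056)/ 51, 2 * ((n - i)% 51)]
      else .inr (i + 13056 * (m : Int)) := by
  induction m with
  | zero =>
    intro j r i n
    show Sum.inr i = _
    rw [if_neg (by push_cast; omega)]
    push_cast
    norm_num
  | succ m ih =>
    intro j r i n
    show (match bLoopA r j (PySem.List.pyRange 0 256 1) i n with
          | .inl v => Sum.inl v
          | .inr i' => gLoopA r (rangeI (j + 1) m) i' n) = _
    rw [pyRange256, bLoop_spec 256 0 r j i n]
    by_cases h : i ≤ n ∧ n < i + 51 * ((256 : Nat) : Int)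
    · rw [if_pos h]
      show Sum.inl [r, j, 0 + (n - i)/ 51, 2 * ((n - i)% 51)] = _
      rw [if_pos (by push_cast at h ⊢; omega)]
      push_cast at h
      exact sumEq _ _ _ _ _ _ _ _ rfl (by omega) (by omega) (by omega)
    · rw [if_neg h]
      show gLoopA r (rangeI (j + 1) m) (i + 51 * ((256 : Nat) : Int)) n = _
      rw [ih (j + 1) r (i + 51 * ((256 : Nat) : Int)) n]
      by_cases h2 : i + 51 * ((256 : Nat) : Int) ≤ n ∧ n < i + 51 * ((256 : Nat) : Int) + 13056 * (m : Int)
      · rw [if_pos h2, if_pos (by push_cast at h h2 ⊢; omega)]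
        push_cast at h h2
        exact sumEq _ _ _ _ _ _ _ _ rfl (by omega) (by omega) (by omega)
      · rw [if_neg h2, if_neg (by push_cast at h h2 ⊢; omega)]
        push_cast
        norm_num
        ring

lemma rLoop_spec (m : Nat) : ∀ (j i n : Int),
    rLoopA (rangeI j m) i n =
      if i ≤ n ∧ n < i + 3342336 * (m : Int) then
        .inl [j + (n - i)/ 3342336, ((n - i)% 3342336)/ 13056,
              ((n - i)% 13056)/ 51, 2 * ((n - i)% 51)]
      else .inr (i + 3342336 * (m : Int)) := by
  induction m with
  | zero =>
    intro j i n
    show Sum.inr i = _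
    rw [if_neg (by push_cast; omega)]
    push_cast
    norm_num
  | succ m ih =>
    intro j i n
    show (match gLoopA j (PySem.List.pyRange 0 256 1) i n with
          | .inl v => Sum.inl v
          | .inr i' => rLoopA (rangeI (j + 1) m) i' n) = _
    rw [pyRange256, gLoop_spec 256 0 j i n]
    by_cases h : i ≤ n ∧ n < i + 13056 * ((256 : Nat) : Int)
    · rw [if_pos h]
      show Sum.inl [j, 0 + (n - i)/ 13056, ((n - i)% 13056)/ 51, 2 * ((n - i)% 51)] = _
      rw [if_pos (by push_cast at h ⊢; omega)]
      push_cast at h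
      exact sumEq _ _ _ _ _ _ _ _ (by omega) (by omega) (by omega) (by omega)
    · rw [if_neg h]
      show rLoopA (rangeI (j + 1) m) (i + 13056 * ((256 : Nat) : Int)) n = _
      rw [ih (j + 1) (i + 13056 * ((256 : Nat) : Int)) n]
      by_cases h2 : i + 13056 * ((256 : Nat) : Int) ≤ n ∧ n < i + 13056 * ((256 : Nat) : Int) + 3342336 * (m : Int)
      · rw [if_pos h2, if_pos (by push_cast at h h2 ⊢; omega)]
        push_cast at h h2
        exact sumEq _ _ _ _ _ _ _ _ (by omega) (by omega) (by omega) (by omega)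
      · rw [if_neg h2, if_neg (by push_cast at h h2 ⊢; omega)]
        push_cast
        norm_num
        ring

-- ===== VERDICT (by name: the statement is the Claim_ definition above) =====
theorem get_nth_rgba_vec_spec : Claim_equal_get_nth_rgba_vec := by
  intro n _ hpre
  obtain ⟨h0, hlt⟩ := hpre
  unfold Spec_get_nth_rgba_vec get_nth_rgba_vec get_nth_rgba_vec_alt
  rw [if_neg (by omega), if_neg (by omega), if_neg (by omega), pyRange256,
      rLoop_spec 256 0 0 n, if_pos (by push_cast; omega)]
  show [0 + (n - 0) / 3342336, (n - 0) % 3342336 / 13056, (n - 0) % 13056 / 51, 2 * ((n - 0) % 51)] =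
    [PySem.Int.floordiv (PySem.Int.floordiv (PySem.Int.floordiv n 51) 256) 256,
     PySem.Int.mod (PySem.Int.floordiv (PySem.Int.floordiv n 51) 256) 256,
     PySem.Int.mod (PySem.Int.floordiv n 51) 256,
     2 * PySem.Int.mod n 51]
  have f51 : ∀ a : Int, PySem.Int.floordiv a 51 = a / 51 := fun a => PySem.Int.floordiv_eq_ediv_of_pos (by norm_num)
  have f256 : ∀ a : Int, PySem.Int.floordiv a 256 = a / 256 := fun a => PySem.Int.floordiv_eq_ediv_of_pos (by norm_num)
  have m51 : ∀ a : Int, PySem.Int.mod a 51 = a % 51 := fun a => PySem.Int.mod_eq_emod_of_pos (by norm_num)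
  have m256 : ∀ a : Int, PySem.Int.mod a 256 = a % 256 := fun a => PySem.Int.mod_eq_emod_of_pos (by norm_num)
  simp only [f51, f256, m51, m256, List.cons.injEq, and_true]
  refine ⟨by omega, by omega, by omega, by omega⟩
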